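-- pv_equiv track=rewrite | github.com/zcjng/gtb | python/class/midterm_practice/midterm1/312-CINNAMOROLL.py | count_quadruples
-- ===== SOURCE A (Python) =====
-- def count_quadruples(H):
--     count = 0
--
--     for a in range(1, H + 1):
--         for b in range(1, H // a + 1):
--             max_c = (H - 1) // (a * b)
--             if max_c > 0:
--                 count += max_c
--
--     return count
-- ===== SOURCE B (Python) =====
-- def _D(m):
--     # divisor-summatory D(m) = sum_{k=1..m} m//k via the hyperbola (sqrt) method
--     t = 0
--     k = 1
--     while k * k <= m:
--         t += m // k
--         k += 1
--     s = k - 1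
--     return 2 * t - s * s
--
--
-- def count_quadruples(H):
--     N = H - 1
--     if N <= 0:
--         return 0
--     total = 0
--     i = 1
--     while i <= N:
--         q = N // i
--         j = N // q
--         total += (j - i + 1) * _D(q)
--         i = j + 1
--     return total
-- ===== Notes on version B (the rewrite author's own statement) =====
-- stated objective: faster
-- what changed: Replaces A's O(H log H) double loop over all (a,b) pairs by the hyperbola/Dirichlet method: the answer becomes a sum over O(sqrt N) blocks of constant quotient q = N//i of (block length)*D(q), where the divisor-summatory D(q) is itself computed by the sqrt trick (twice the partial sum of q//k for k up to sqrt q, minus the square of floor(sqrt q)), giving roughly O(H^(three quarters)) work.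
import Mathlib
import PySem

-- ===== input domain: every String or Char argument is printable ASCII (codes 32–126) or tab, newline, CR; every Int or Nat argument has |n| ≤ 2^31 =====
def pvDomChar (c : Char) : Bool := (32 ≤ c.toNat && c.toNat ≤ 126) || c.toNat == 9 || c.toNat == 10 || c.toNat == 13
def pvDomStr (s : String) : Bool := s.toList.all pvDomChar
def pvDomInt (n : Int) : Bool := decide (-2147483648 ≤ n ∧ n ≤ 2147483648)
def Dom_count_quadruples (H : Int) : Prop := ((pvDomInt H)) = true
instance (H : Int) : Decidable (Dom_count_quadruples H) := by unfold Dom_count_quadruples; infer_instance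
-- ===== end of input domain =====

-- B replaces A's O(H log H) double loop by the hyperbola/Dirichlet method (blocks of
-- constant quotient, divisor-summatory D via the sqrt trick); measurably faster.

-- ===== PORT A =====
def count_quadruples (H : Int) : Int :=
  (PySem.List.pyRange 1 (H + 1) 1).foldl (fun count a =>
    (PySem.List.pyRange 1 (PySem.Int.floordiv H a + 1) 1).foldl (fun count b =>
      let max_c := PySem.Int.floordiv (H - 1) (a * b)
      if max_c > 0 then count + max_c else count) count) 0

-- ===== PORT B =====
-- termination helper for the `while k * k <= m` loop of `_D` (cited in decreasing_by)
theorem pvDLoop_le {m k : Nat} (h : k * k ≤ m) : k ≤ m := by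
  cases k with
  | zero => exact Nat.zero_le m
  | succ k' =>
    calc k' + 1 = (k' + 1) * 1 := by ring
    _ ≤ (k' + 1) * (k' + 1) := Nat.mul_le_mul_left _ (by omega)
    _ ≤ m := h

-- `_D`'s loop: `t, k = 0, 1; while k*k <= m: t += m//k; k += 1`; returns (t, k)
def pvDLoop (m t k : Nat) : Nat × Nat :=
  if h : k * k ≤ m then pvDLoop m (t + m / k) (k + 1) else (t, k)
termination_by m + 1 - k
decreasing_by have := pvDLoop_le h; omega

-- `_D(m) = 2*t - s*s` with `s = k - 1`
def pvD (m : Nat) : Int :=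
  let p := pvDLoop m 0 1
  let s := p.2 - 1
  2 * (p.1 : Int) - (s : Int) * (s : Int)

-- termination helper for the block loop (cited in decreasing_by)
theorem pvBLoop_lt {N i : Nat} (h : i ≤ N) : i < N / (N / i) + 1 := by
  rcases Nat.eq_zero_or_pos i with hi | hi
  · subst hi; exact Nat.succ_pos _
  · have hq : 0 < N / i := Nat.div_pos h hi
    have : i ≤ N / (N / i) :=
      (Nat.le_div_iff_mul_le hq).mpr (by rw [Nat.mul_comm]; exact Nat.div_mul_le_self N i)
    omega

-- `while i <= N: q = N//i; j = N//q; total += (j-i+1)*_D(q); i = j+1`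
def pvBLoop (N i : Nat) (total : Int) : Int :=
  if h : i ≤ N then
    let q := N / i
    let j := N / q
    pvBLoop N (j + 1) (total + ((j : Int) - (i : Int) + 1) * pvD q)
  else total
termination_by N + 1 - i
decreasing_by have h1 := pvBLoop_lt h; have h2 := Nat.div_le_self N (N / i); omega

def count_quadruples_alt (H : Int) : Int :=
  let N := H - 1
  if N ≤ 0 then 0 else pvBLoop N.toNat 1 0

-- ===== PRECONDITION & SPEC =====
def Spec_count_quadruples (H : Int) (out : Int) : Prop := out = count_quadruples_alt H
instance (H : Int) (out : Int) : Decidable (Spec_count_quadruples H out) := by unfold Spec_count_quadruples; infer_instance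

-- ===== CLAIM (what is proved, stated in full; the proofs are below) =====
def Claim_equal_count_quadruples : Prop := ∀ (H : Int), Dom_count_quadruples H → Spec_count_quadruples H (count_quadruples H)

-- ===== LEMMAS AND PROOFS =====

-- canonical value: S2 m = ∑_{k=1..m} m/k (the divisor-summatory function D(m))
def S2 (m : Nat) : Nat := ∑ k ∈ Finset.Ioc 0 m, m / k

-- the sqrt loop computes the partial sum up to √m
theorem pvDLoop_eq (m : Nat) : ∀ (d t k : Nat), 1 ≤ k → k + d = Nat.sqrt m + 1 →
    pvDLoop m t k = (t + ∑ j ∈ Finset.Ioc (k - 1) (Nat.sqrt m), m / j, Nat.sqrt m + 1) := by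
  intro d
  induction d with
  | zero =>
    intro t k hk hd
    have hks : Nat.sqrt m < k := by omega
    have hgt : ¬ k * k ≤ m := by
      intro hle
      exact absurd (Nat.le_sqrt.mpr hle) (by omega)
    rw [pvDLoop, dif_neg hgt]
    have : Finset.Ioc (k - 1) (Nat.sqrt m) = ∅ := by
      apply Finset.Ioc_eq_empty
      omega
    simp [this]
    omega
  | succ d ih =>
    intro t k hk hd
    have hks : k ≤ Nat.sqrt m := by omega
    have hle : k * k ≤ m := Nat.le_sqrt.mp hks
    rw [pvDLoop, dif_pos hle]
    rw [ih (t + m / k) (k + 1) (by omega) (by omega)]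
    have hsplit : ∑ j ∈ Finset.Ioc (k - 1) k, m / j + ∑ j ∈ Finset.Ioc k (Nat.sqrt m), m / j
        = ∑ j ∈ Finset.Ioc (k - 1) (Nat.sqrt m), m / j :=
      Finset.sum_Ioc_consecutive _ (by omega) hks
    have hsingle : Finset.Ioc (k - 1) k = {k} := by
      ext x
      simp [Finset.mem_Ioc]
      omega
    rw [hsingle, Finset.sum_singleton] at hsplit
    simp only [Nat.add_sub_cancel]
    rw [Prod.mk.injEq]
    constructor
    · omega
    · rfl

-- hyperbola identity: D(m) + ⌊√m⌋² = 2·∑_{k≤√m} m/k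
theorem hyperbola (m : Nat) :
    S2 m + Nat.sqrt m * Nat.sqrt m = 2 * ∑ k ∈ Finset.Ioc 0 (Nat.sqrt m), m / k := by
  set s := Nat.sqrt m with hs
  have hsm : s ≤ m := Nat.sqrt_le_self m
  have hss : s * s ≤ m := by
    have := Nat.sqrt_le' m
    simpa [pow_two, hs] using this
  have hlt : m < (s + 1) * (s + 1) := by
    have := Nat.lt_succ_sqrt' m
    simpa [pow_two, Nat.succ_eq_add_one, hs] using this
  have hsplit : ∑ k ∈ Finset.Ioc 0 s, m / k + ∑ k ∈ Finset.Ioc s m, m / k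
      = ∑ k ∈ Finset.Ioc 0 m, m / k := Finset.sum_Ioc_consecutive _ (Nat.zero_le s) hsm
  have hfib1 : ∀ k ∈ Finset.Ioc s m, m / k = ∑ l ∈ Finset.Ioc 0 s, if k * l ≤ m then 1 else 0 := by
    intro k hk
    simp only [Finset.mem_Ioc] at hk
    have hk0 : 0 < k := by omega
    have hmk : m / k ≤ s := by
      have h1 : m / k ≤ m / (s + 1) := Nat.div_le_div_left (by omega) (by omega)
      have h2 : m / (s + 1) < s + 1 := (Nat.div_lt_iff_lt_mul (by omega)).mpr hlt
      omega
    have hfilter : Finset.filter (fun l => k * l ≤ m) (Finset.Ioc 0 s) = Finset.Ioc 0 (m / k) := by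
      ext l
      simp only [Finset.mem_filter, Finset.mem_Ioc]
      constructor
      · rintro ⟨⟨hl0, _⟩, hklm⟩
        exact ⟨hl0, (Nat.le_div_iff_mul_le hk0).mpr (by rw [Nat.mul_comm]; exact hklm)⟩
      · rintro ⟨hl0, hlk⟩
        have hmul := (Nat.le_div_iff_mul_le hk0).mp hlk
        exact ⟨⟨hl0, le_trans hlk hmk⟩, by rw [Nat.mul_comm]; exact hmul⟩
    calc m / k = (Finset.Ioc 0 (m / k)).card := by simp [Nat.card_Ioc]
    _ = (Finset.filter (fun l => k * l ≤ m) (Finset.Ioc 0 s)).card := by rw [hfilter]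
    _ = ∑ l ∈ Finset.Ioc 0 s, if k * l ≤ m then 1 else 0 := Finset.card_filter _ _
  have hfib2 : ∀ l ∈ Finset.Ioc 0 s, (∑ k ∈ Finset.Ioc s m, if k * l ≤ m then 1 else 0) = m / l - s := by
    intro l hl
    simp only [Finset.mem_Ioc] at hl
    have hl0 : 0 < l := hl.1
    have hml : m / l ≤ m := Nat.div_le_self m l
    have hfilter : Finset.filter (fun k => k * l ≤ m) (Finset.Ioc s m) = Finset.Ioc s (m / l) := by
      ext k
      simp only [Finset.mem_filter, Finset.mem_Ioc]
      constructor
      · rintro ⟨⟨hk1, _⟩, hklm⟩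
        exact ⟨hk1, (Nat.le_div_iff_mul_le hl0).mpr hklm⟩
      · rintro ⟨hk1, hk2⟩
        exact ⟨⟨hk1, le_trans hk2 hml⟩, (Nat.le_div_iff_mul_le hl0).mp hk2⟩
    rw [← Finset.card_filter, hfilter, Nat.card_Ioc]
  have hswap : ∑ k ∈ Finset.Ioc s m, m / k = ∑ l ∈ Finset.Ioc 0 s, (m / l - s) := by
    calc ∑ k ∈ Finset.Ioc s m, m / k
        = ∑ k ∈ Finset.Ioc s m, ∑ l ∈ Finset.Ioc 0 s, if k * l ≤ m then 1 else 0 :=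
          Finset.sum_congr rfl hfib1
    _ = ∑ l ∈ Finset.Ioc 0 s, ∑ k ∈ Finset.Ioc s m, if k * l ≤ m then 1 else 0 :=
          Finset.sum_comm
    _ = ∑ l ∈ Finset.Ioc 0 s, (m / l - s) := Finset.sum_congr rfl hfib2
  have hges : ∀ l ∈ Finset.Ioc 0 s, s ≤ m / l := by
    intro l hl
    simp only [Finset.mem_Ioc] at hl
    exact (Nat.le_div_iff_mul_le hl.1).mpr (le_trans (Nat.mul_le_mul_left s hl.2) hss)
  have hfinal : ∑ l ∈ Finset.Ioc 0 s, (m / l - s) + s * s = ∑ l ∈ Finset.Ioc 0 s, m / l := by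
    have hadd : ∑ l ∈ Finset.Ioc 0 s, (m / l - s) + ∑ _l ∈ Finset.Ioc 0 s, s
        = ∑ l ∈ Finset.Ioc 0 s, ((m / l - s) + s) := Finset.sum_add_distrib.symm
    rw [Finset.sum_const, Nat.card_Ioc, smul_eq_mul, Nat.sub_zero] at hadd
    have hc : ∑ l ∈ Finset.Ioc 0 s, ((m / l - s) + s) = ∑ l ∈ Finset.Ioc 0 s, m / l :=
      Finset.sum_congr rfl (fun l hl => Nat.sub_add_cancel (hges l hl))
    omega
  unfold S2
  omega

theorem pvD_eq (m : Nat) : pvD m = (S2 m : Int) := by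
  have hloop := pvDLoop_eq m (Nat.sqrt m) 0 1 (le_refl 1) (by omega)
  have h := hyperbola m
  have h' : (S2 m : Int) + (Nat.sqrt m : Int) * (Nat.sqrt m : Int)
      = 2 * ((∑ j ∈ Finset.Ioc 0 (Nat.sqrt m), m / j : Nat) : Int) := by exact_mod_cast h
  simp only [pvD, hloop, Nat.zero_add, Nat.add_sub_cancel]
  norm_num
  linarith

-- quotients are constant on a block
theorem div_const_on_block {N i a : Nat} (hi : 1 ≤ i) (hia : i ≤ a) (haj : a ≤ N / (N / i)) :
    N / a = N / i := by
  have ha : 0 < a := lt_of_lt_of_le hi hia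
  have hq : 0 < N / i := by
    rcases Nat.lt_or_ge N i with h | h
    · exfalso
      have : N / (N / i) ≤ N := Nat.div_le_self _ _
      have : N / i = 0 := Nat.div_eq_of_lt h
      omega
    · exact Nat.div_pos h hi
  have h1 : N / a ≤ N / i := Nat.div_le_div_left hia hi
  have h2 : N / i ≤ N / a :=
    (Nat.le_div_iff_mul_le ha).mpr (by
      rw [Nat.mul_comm]
      exact (Nat.le_div_iff_mul_le hq).mp haj)
  omega

-- the block loop sums S2 (N/a) for a from i to N
theorem pvBLoop_eq (N : Nat) : ∀ (fuel i : Nat) (total : Int), 1 ≤ i → N + 1 - i ≤ fuel →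
    pvBLoop N i total = total + ((∑ a ∈ Finset.Ioc (i - 1) N, S2 (N / a) : Nat) : Int) := by
  intro fuel
  induction fuel with
  | zero =>
    intro i total hi hf
    rw [pvBLoop, dif_neg (by omega : ¬ i ≤ N)]
    rw [Finset.Ioc_eq_empty (by omega : ¬ i - 1 < N)]
    simp
  | succ f ih =>
    intro i total hi hf
    by_cases hiN : i ≤ N
    · rw [pvBLoop, dif_pos hiN]
      show pvBLoop N (N / (N / i) + 1)
          (total + ((N / (N / i) : Nat) - (i : Int) + 1) * pvD (N / i)) = _
      have hij : i ≤ N / (N / i) := by have := pvBLoop_lt hiN; omega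
      have hjN : N / (N / i) ≤ N := Nat.div_le_self _ _
      rw [ih (N / (N / i) + 1) _ (by omega) (by omega)]
      simp only [Nat.add_sub_cancel]
      have hconst : ∀ a ∈ Finset.Ioc (i - 1) (N / (N / i)), S2 (N / a) = S2 (N / i) := by
        intro a ha
        simp only [Finset.mem_Ioc] at ha
        rw [div_const_on_block hi (by omega) ha.2]
      have hsplit : ∑ a ∈ Finset.Ioc (i - 1) (N / (N / i)), S2 (N / a)
          + ∑ a ∈ Finset.Ioc (N / (N / i)) N, S2 (N / a)
          = ∑ a ∈ Finset.Ioc (i - 1) N, S2 (N / a) :=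
        Finset.sum_Ioc_consecutive _ (by omega) hjN
      have hconstsum : ∑ a ∈ Finset.Ioc (i - 1) (N / (N / i)), S2 (N / a)
          = (N / (N / i) - (i - 1)) * S2 (N / i) := by
        rw [Finset.sum_congr rfl hconst, Finset.sum_const, Nat.card_Ioc, smul_eq_mul]
      have hcast : ((N / (N / i) - (i - 1) : Nat) : Int)
          = ((N / (N / i) : Nat) : Int) - (i : Int) + 1 := by omega
      rw [pvD_eq, ← hsplit, hconstsum]
      push_cast [hcast]
      ring
    · rw [pvBLoop, dif_neg hiN]
      rw [Finset.Ioc_eq_empty (by omega : ¬ i - 1 < N)]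
      simp

-- list-sum over pyRange 1 (m+1) is the Finset sum over Ioc 0 m
theorem pyRange_sum (f : Int → Int) (m : Nat) :
    ((PySem.List.pyRange 1 ((m : Int) + 1) 1).map f).sum = ∑ k ∈ Finset.Ioc 0 m, f (k : Int) := by
  induction m with
  | zero => simp [PySem.List.pyRange_one_eq_nil]
  | succ m ih =>
    rw [show (((m + 1 : Nat)) : Int) + 1 = ((m : Int) + 1) + 1 by push_cast; ring]
    rw [PySem.List.pyRange_one_succ_right (by omega : (1 : Int) ≤ (m : Int) + 1)]
    rw [List.map_append, List.sum_append]
    rw [ih, Finset.sum_Ioc_succ_top (Nat.zero_le m)]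
    simp only [List.map_cons, List.map_nil, List.sum_cons, List.sum_nil, add_zero]
    congr 1

-- A's value in canonical form
-- the inner sum of A, in Nat form, equals S2 ((n-1)/a)
theorem innerNat (n a : Nat) (ha : 1 ≤ a) (hn : 1 ≤ n) :
    ∑ b ∈ Finset.Ioc 0 (n / a), (if 0 < (n - 1) / (a * b) then (n - 1) / (a * b) else 0)
      = S2 ((n - 1) / a) := by
  have ha0 : 0 < a := ha
  have hsub : Finset.Ioc 0 ((n - 1) / a) ⊆ Finset.Ioc 0 (n / a) :=
    Finset.Ioc_subset_Ioc (le_refl 0) (Nat.div_le_div_right (by omega))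
  have hvanish : ∀ b ∈ Finset.Ioc 0 (n / a), b ∉ Finset.Ioc 0 ((n - 1) / a) →
      (if 0 < (n - 1) / (a * b) then (n - 1) / (a * b) else 0) = 0 := by
    intro b hb hbn
    simp only [Finset.mem_Ioc] at hb hbn
    have hgt : ¬ b ≤ (n - 1) / a := by tauto
    have hlt : n - 1 < a * b := by
      rcases Nat.lt_or_ge (n - 1) (a * b) with h | h
      · exact h
      · exact absurd ((Nat.le_div_iff_mul_le ha0).mpr (by rw [Nat.mul_comm]; exact h)) hgt
    rw [if_neg]
    simp [Nat.div_eq_of_lt hlt]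
  rw [← Finset.sum_subset hsub hvanish]
  apply Finset.sum_congr rfl
  intro b hb
  simp only [Finset.mem_Ioc] at hb
  have hab : a * b ≤ n - 1 := by
    have := (Nat.le_div_iff_mul_le ha0).mp hb.2
    rw [Nat.mul_comm] at this
    exact this
  have hpos : 0 < (n - 1) / (a * b) :=
    Nat.div_pos hab (Nat.mul_pos ha0 hb.1)
  rw [if_pos hpos, ← Nat.div_div_eq_div_mul]

-- A's value in canonical form
theorem A_eq (n : Nat) (hn : 1 ≤ n) :
    count_quadruples (n : Int) = ((∑ a ∈ Finset.Ioc 0 (n - 1), S2 ((n - 1) / a) : Nat) : Int) := by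
  have hinner : ∀ (count a : Int),
      (PySem.List.pyRange 1 (PySem.Int.floordiv ((n : Int)) a + 1) 1).foldl
        (fun count b =>
          let max_c := PySem.Int.floordiv ((n : Int) - 1) (a * b)
          if max_c > 0 then count + max_c else count) count
      = count + ((PySem.List.pyRange 1 (PySem.Int.floordiv ((n : Int)) a + 1) 1).map
          (fun b => if PySem.Int.floordiv ((n : Int) - 1) (a * b) > 0
            then PySem.Int.floordiv ((n : Int) - 1) (a * b) else 0)).sum := by
    intro count a
    rw [show (fun (count b : Int) =>
        let max_c := PySem.Int.floordiv ((n : Int) - 1) (a * b)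
        if max_c > 0 then count + max_c else count)
      = fun (count b : Int) => count + (if PySem.Int.floordiv ((n : Int) - 1) (a * b) > 0
          then PySem.Int.floordiv ((n : Int) - 1) (a * b) else 0) from by
        funext count b
        show (if PySem.Int.floordiv ((n : Int) - 1) (a * b) > 0
            then count + PySem.Int.floordiv ((n : Int) - 1) (a * b) else count) = _
        split_ifs <;> simp]
    exact PySem.List.foldl_add _ _ _
  unfold count_quadruples
  rw [show (fun (count a : Int) =>
      (PySem.List.pyRange 1 (PySem.Int.floordiv ((n : Int)) a + 1) 1).foldl
        (fun count b =>
          let max_c := PySem.Int.floordiv ((n : Int) - 1) (a * b)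
          if max_c > 0 then count + max_c else count) count)
    = fun (count a : Int) => count +
        ((PySem.List.pyRange 1 (PySem.Int.floordiv ((n : Int)) a + 1) 1).map
          (fun b => if PySem.Int.floordiv ((n : Int) - 1) (a * b) > 0
            then PySem.Int.floordiv ((n : Int) - 1) (a * b) else 0)).sum from by
      funext count a
      exact hinner count a]
  rw [PySem.List.foldl_add, zero_add, pyRange_sum]
  have hterm : ∀ a : Nat, a ∈ Finset.Ioc 0 n →
      ((PySem.List.pyRange 1 (PySem.Int.floordiv ((n : Int)) (a : Int) + 1) 1).map
          (fun b => if PySem.Int.floordiv ((n : Int) - 1) ((a : Int) * b) > 0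
            then PySem.Int.floordiv ((n : Int) - 1) ((a : Int) * b) else 0)).sum
      = ((∑ b ∈ Finset.Ioc 0 (n / a),
          (if 0 < (n - 1) / (a * b) then (n - 1) / (a * b) else 0) : Nat) : Int) := by
    intro a ha
    simp only [Finset.mem_Ioc] at ha
    rw [show PySem.Int.floordiv ((n : Int)) (a : Int) = ((n / a : Nat) : Int) from
      PySem.Int.floordiv_natCast n a]
    rw [pyRange_sum, Nat.cast_sum]
    apply Finset.sum_congr rfl
    intro b hb
    simp only [Finset.mem_Ioc] at hb
    rw [show ((n : Int) - 1) = ((n - 1 : Nat) : Int) by omega]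
    rw [show ((a : Int) * (b : Int)) = (((a * b : Nat)) : Int) by push_cast; ring]
    rw [show PySem.Int.floordiv ((n - 1 : Nat) : Int) ((a * b : Nat) : Int)
        = (((n - 1) / (a * b) : Nat) : Int) from PySem.Int.floordiv_natCast _ _]
    rcases Nat.eq_zero_or_pos ((n - 1) / (a * b)) with h | h
    · rw [h]
      simp
    · rw [if_pos (by exact_mod_cast h), if_pos h]
  rw [Finset.sum_congr rfl hterm]
  rw [← Nat.cast_sum]
  congr 1
  rw [Finset.sum_congr rfl (fun a ha => by
    simp only [Finset.mem_Ioc] at ha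
    exact innerNat n a ha.1 hn)]
  symm
  apply Finset.sum_subset (Finset.Ioc_subset_Ioc (le_refl 0) (by omega : n - 1 ≤ n))
  intro a ha han
  simp only [Finset.mem_Ioc] at ha han
  have : (n - 1) / a = 0 := Nat.div_eq_of_lt (by omega)
  rw [this]
  simp [S2]

-- ===== VERDICT (by name: the statement is the Claim_ definition above) =====
theorem count_quadruples_spec : Claim_equal_count_quadruples := by
  intro H _
  unfold Spec_count_quadruples
  by_cases hH : H ≤ 0
  · have hA : count_quadruples H = 0 := by
      unfold count_quadruples
      rw [PySem.List.pyRange_one_eq_nil (by omega : H + 1 ≤ 1)]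
      rfl
    have hB : count_quadruples_alt H = 0 := by
      unfold count_quadruples_alt
      rw [if_pos (by omega : H - 1 ≤ 0)]
    rw [hA, hB]
  · obtain ⟨n, rfl⟩ : ∃ n : Nat, H = (n : Int) :=
      ⟨H.toNat, (Int.toNat_of_nonneg (by omega)).symm⟩
    have hn : 1 ≤ n := by omega
    rw [A_eq n hn]
    unfold count_quadruples_alt
    by_cases h1 : n = 1
    · subst h1
      norm_num
    · rw [if_neg (by omega : ¬ (n : Int) - 1 ≤ 0)]
      rw [show ((n : Int) - 1).toNat = n - 1 by omega]
      rw [pvBLoop_eq (n - 1) n 1 0 (le_refl 1) (by omega)]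
      norm_num
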